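-- pv_equiv track=rewrite | github.com/Janhavi6261/ACC45DAYSOFCODE-2024 | Day22-DPOLY.py | find_polynomial_degree
-- ===== SOURCE A (Python) =====
-- def find_polynomial_degree(test_cases):
--     results = []
--     for N, coefficients in test_cases:
--         degree = -1
--
--         for i in range(N - 1, -1, -1):
--             if coefficients[i] != 0:
--                 degree = i
--                 break
--         results.append(degree)
--     return results
-- ===== SOURCE B (Python) =====
-- def find_polynomial_degree(test_cases):
--     return [max((i for i in range(N) if coefficients[i] != 0), default=-1)
--             for N, coefficients in test_cases]
-- ===== Notes on version B (the rewrite author's own statement) =====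
-- stated objective: idiomatic
-- what changed: Replaces the explicit top-down search-with-break and accumulator list by a single list comprehension taking max (default -1) over the nonzero-coefficient indices of each case.
import Mathlib
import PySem

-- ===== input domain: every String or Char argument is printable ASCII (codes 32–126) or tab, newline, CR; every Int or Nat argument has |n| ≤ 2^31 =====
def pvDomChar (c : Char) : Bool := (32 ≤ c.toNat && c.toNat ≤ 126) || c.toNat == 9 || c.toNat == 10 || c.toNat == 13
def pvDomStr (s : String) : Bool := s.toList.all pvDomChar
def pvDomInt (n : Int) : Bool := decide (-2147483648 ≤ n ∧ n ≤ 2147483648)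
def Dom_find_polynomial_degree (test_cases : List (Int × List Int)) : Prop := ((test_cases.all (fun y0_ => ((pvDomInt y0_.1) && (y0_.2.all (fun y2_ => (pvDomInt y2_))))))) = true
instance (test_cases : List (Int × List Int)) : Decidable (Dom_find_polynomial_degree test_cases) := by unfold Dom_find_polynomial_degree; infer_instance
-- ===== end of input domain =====

-- B rewrites A's top-down search-with-break as a comprehension taking max (default -1)
-- over the nonzero-coefficient indices; same results, proved equal on Pre_.

-- ===== PORT A =====
-- inner 'for i in range(N-1,-1,-1): if coefficients[i] != 0: degree = i; break' (degree starts -1).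
-- coefficients[i]: Python raises IndexError when i is out of range; here pyGetD gives 0 there,
-- exact on Pre_ (which guarantees every visited index is in range).
def degLoopA (coeffs : List Int) : List Int → Int
  | [] => -1
  | i :: rest => if PySem.List.pyGetD coeffs i 0 ≠ 0 then i else degLoopA coeffs rest

def find_polynomial_degree (test_cases : List (Int × List Int)) : List Int :=
  test_cases.foldl
    (fun results c => results ++ [degLoopA c.2 (PySem.List.pyRange (c.1 - 1) (-1) (-1))]) []

-- ===== PORT B =====
-- Python's max(gen, default=-1): the default for an empty generator, else the maximum.
def pyMaxD : List Int → Int → Int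
  | [], d => d
  | x :: xs, _ => xs.foldl max x

def find_polynomial_degree_alt (test_cases : List (Int × List Int)) : List Int :=
  test_cases.map (fun c =>
    pyMaxD (((PySem.List.pyRange 0 c.1 1)).filter (fun i => PySem.List.pyGetD c.2 i 0 != 0)) (-1))

-- ===== PRECONDITION & SPEC =====
-- Pre_ excludes exactly the inputs where the Python A raises IndexError: a case with N
-- exceeding the coefficient-list length (B raises there too).
def Pre_find_polynomial_degree (test_cases : List (Int × List Int)) : Prop :=
  ∀ c ∈ test_cases, c.1 ≤ (c.2.length : Int)
instance (test_cases : List (Int × List Int)) : Decidable (Pre_find_polynomial_degree test_cases) := by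
  unfold Pre_find_polynomial_degree; infer_instance

def pvWitness_find_polynomial_degree : (List (Int × List Int)) := [(2, [0, 3]), (0, []), (3, [1, 0, 0])]

def Spec_find_polynomial_degree (test_cases : List (Int × List Int)) (out : List Int) : Prop := out = find_polynomial_degree_alt test_cases
instance (test_cases : List (Int × List Int)) (out : List Int) : Decidable (Spec_find_polynomial_degree test_cases out) := by unfold Spec_find_polynomial_degree; infer_instance

-- ===== CLAIM (what is proved, stated in full; the proofs are below) =====
def Claim_equal_find_polynomial_degree : Prop := ∀ (test_cases : List (Int × List Int)), Dom_find_polynomial_degree test_cases → Pre_find_polynomial_degree test_cases → Spec_find_polynomial_degree test_cases (find_polynomial_degree test_cases)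

-- ===== LEMMAS AND PROOFS =====

theorem foldl_max_last (x : Int) : ∀ (ys : List Int) (y : Int), (∀ z ∈ ys, z ≤ x) → y ≤ x →
    (ys ++ [x]).foldl max y = x := by
  intro ys
  induction ys with
  | nil => intro y _ hy; simp [max_eq_right hy]
  | cons z zs ih =>
      intro y hall hy
      simp only [List.cons_append, List.foldl_cons]
      exact ih (max y z) (fun w hw => hall w (List.mem_cons_of_mem _ hw))
        (max_le hy (hall z (List.mem_cons_self)))

theorem pyMaxD_append_last (l : List Int) (x d : Int)
    (hall : ∀ y ∈ l, y ≤ x) (_hd : d ≤ x) : pyMaxD (l ++ [x]) d = x := by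
  cases l with
  | nil => simp [pyMaxD]
  | cons y ys =>
      simp only [List.cons_append, pyMaxD]
      exact foldl_max_last x ys y (fun z hz => hall z (List.mem_cons_of_mem _ hz))
        (hall y (List.mem_cons_self))

theorem key (coeffs : List Int) (n : Nat) :
    degLoopA coeffs ((PySem.List.pyRange 0 (n : Int) 1).reverse)
      = pyMaxD ((PySem.List.pyRange 0 (n : Int) 1).filter
          (fun i => PySem.List.pyGetD coeffs i 0 != 0)) (-1) := by
  induction n with
  | zero => simp [degLoopA, pyMaxD]
  | succ m ih =>
      have hsplit : PySem.List.pyRange 0 ((m : Int) + 1) 1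
          = PySem.List.pyRange 0 (m : Int) 1 ++ [(m : Int)] :=
        PySem.List.pyRange_one_succ_right (by exact_mod_cast Nat.zero_le m)
      push_cast
      rw [hsplit, List.reverse_append, List.filter_append]
      simp only [List.reverse_cons, List.reverse_nil, List.nil_append, List.cons_append,
        List.nil_append, degLoopA, List.filter_cons, List.filter_nil]
      by_cases hp : PySem.List.pyGetD coeffs (m : Int) 0 ≠ 0
      · rw [if_pos hp]
        have hb : (PySem.List.pyGetD coeffs (m : Int) 0 != 0) = true := by
          simpa using hp
        rw [hb]
        refine (pyMaxD_append_last _ _ _ ?_ (by omega)).symm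
        intro y hy
        have := (PySem.List.mem_pyRange_one.mp (List.mem_of_mem_filter hy)).2
        omega
      · rw [if_neg hp]
        have hb : (PySem.List.pyGetD coeffs (m : Int) 0 != 0) = false := by
          simpa using hp
        rw [hb]
        simpa using ih

theorem per_case (c : Int × List Int) :
    degLoopA c.2 (PySem.List.pyRange (c.1 - 1) (-1) (-1))
      = pyMaxD ((PySem.List.pyRange 0 c.1 1).filter
          (fun i => PySem.List.pyGetD c.2 i 0 != 0)) (-1) := by
  rcases le_or_gt c.1 0 with h | h
  · rw [PySem.List.pyRange_neg_one_eq_nil (by omega),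
        PySem.List.pyRange_one_eq_nil (by omega)]
    simp [degLoopA, pyMaxD]
  · have hrev : PySem.List.pyRange (c.1 - 1) (-1) (-1)
        = (PySem.List.pyRange 0 c.1 1).reverse := by
      have := PySem.List.pyRange_neg_one_eq_reverse (c.1 - 1) (-1)
      simpa using this
    rw [hrev]
    obtain ⟨n, hn⟩ : ∃ n : Nat, c.1 = (n : Int) := ⟨c.1.toNat, by omega⟩
    rw [hn]; exact key c.2 n

theorem foldl_append_map (f : Int × List Int → Int) :
    ∀ (l : List (Int × List Int)) (acc : List Int),
      l.foldl (fun results c => results ++ [f c]) acc = acc ++ l.map f := by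
  intro l
  induction l with
  | nil => simp
  | cons c cs ih => intro acc; simp [ih]

-- ===== VERDICT (by name: the statement is the Claim_ definition above) =====
theorem find_polynomial_degree_spec : Claim_equal_find_polynomial_degree := by
  intro test_cases _ _
  unfold Spec_find_polynomial_degree find_polynomial_degree find_polynomial_degree_alt
  rw [foldl_append_map]
  simp only [List.nil_append]
  exact List.map_congr_left (fun c _ => per_case c)
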